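-- pv_equiv track=rewrite | github.com/Betanu701/atlas-cortex | cortex/memory/cag.py | _fts_sanitize
-- ===== SOURCE A (Python) =====
-- def _fts_sanitize(query: str) -> str:
--     """Sanitize a free-text string for safe use in FTS5 MATCH."""
--     clean = ""
--     for ch in query:
--         if ch.isalnum() or ch in " _-":
--             clean += ch
--         else:
--             clean += " "
--     tokens = [t.strip() for t in clean.split() if len(t.strip()) >= 2]
--     if not tokens:
--         return ""
--     return " OR ".join(tokens)
-- ===== SOURCE B (Python) =====
-- def _fts_sanitize(query: str) -> str:
--     """Sanitize a free-text string for safe use in FTS5 MATCH."""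
--     tokens = []
--     buf = ""
--     for ch in query:
--         if ch.isalnum() or ch in "_-":
--             buf += ch
--         else:
--             if buf:
--                 tokens.append(buf)
--             buf = ""
--     if buf:
--         tokens.append(buf)
--     tokens = [t for t in tokens if len(t) >= 2]
--     return " OR ".join(tokens) if tokens else ""
-- ===== Notes on version B (the rewrite author's own statement) =====
-- stated objective: simpler
-- what changed: B drops A's intermediate cleaned string and its split()/strip() pipeline and instead tokenizes in a single pass, flushing a running buffer at each separator character and filtering short tokens once at the end.
import Mathlib
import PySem

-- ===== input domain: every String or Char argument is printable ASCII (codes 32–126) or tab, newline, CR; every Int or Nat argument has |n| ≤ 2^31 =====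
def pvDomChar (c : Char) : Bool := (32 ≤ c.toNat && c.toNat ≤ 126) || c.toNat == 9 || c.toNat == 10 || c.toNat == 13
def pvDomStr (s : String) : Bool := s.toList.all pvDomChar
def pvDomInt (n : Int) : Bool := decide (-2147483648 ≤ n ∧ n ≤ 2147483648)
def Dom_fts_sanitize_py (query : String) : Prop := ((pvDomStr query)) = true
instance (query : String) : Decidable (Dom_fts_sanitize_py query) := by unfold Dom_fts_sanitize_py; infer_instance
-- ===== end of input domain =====

-- B replaces A's build-clean-string-then-split()-then-strip() pipeline by a single pass that
-- flushes a running token buffer at each separator character (objective: simpler).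

-- ===== PORT A =====
-- `ch in " _-"` (a 1-char needle) is ported as character membership in the 3-char list, exact here.
def fts_sanitize_py (query : String) : String :=
  let clean : List Char := query.toList.foldl
    (fun acc ch =>
      if PySem.Chars.isalnum ch || (" _-".toList).contains ch then acc ++ [ch] else acc ++ [' '])
    []
  let tokens : List (List Char) :=
    ((PySem.Chars.split₀ clean).filter
        (fun t => 2 ≤ (PySem.Chars.strip t).length)).map (fun t => PySem.Chars.strip t)
  if tokens.isEmpty then "" else String.mk (PySem.Chars.join " OR ".toList tokens)

-- ===== PORT B =====
def fts_sanitize_py_alt (query : String) : String :=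
  let st := query.toList.foldl
    (fun (st : List Char × List (List Char)) ch =>
      if PySem.Chars.isalnum ch || ("_-".toList).contains ch then (st.1 ++ [ch], st.2)
      else (([] : List Char), if st.1.isEmpty then st.2 else st.2 ++ [st.1]))
    ([], [])
  let toks := if st.1.isEmpty then st.2 else st.2 ++ [st.1]
  let tokens := toks.filter (fun t => 2 ≤ t.length)
  if tokens.isEmpty then "" else String.mk (PySem.Chars.join " OR ".toList tokens)

-- ===== PRECONDITION & SPEC =====
def Spec_fts_sanitize_py (query : String) (out : String) : Prop := out = fts_sanitize_py_alt query
instance (query : String) (out : String) : Decidable (Spec_fts_sanitize_py query out) := by unfold Spec_fts_sanitize_py; infer_instance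

-- ===== CLAIM (what is proved, stated in full; the proofs are below) =====
def Claim_equal_fts_sanitize_py : Prop := ∀ (query : String), Dom_fts_sanitize_py query → Spec_fts_sanitize_py query (fts_sanitize_py query)

-- ===== LEMMAS AND PROOFS =====

-- A's "clean" character map: kept characters stay, everything else becomes a space.
def pvKeep (c : Char) : Bool := PySem.Chars.isalnum c || (" _-".toList).contains c
-- B's token-character test.
def pvTok (c : Char) : Bool := PySem.Chars.isalnum c || ("_-".toList).contains c
def pvClean (c : Char) : Char := if pvKeep c then c else ' '
-- B's loop step.
def pvStep (st : List Char × List (List Char)) (ch : Char) : List Char × List (List Char) :=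
  if pvTok ch then (st.1 ++ [ch], st.2)
  else (([] : List Char), if st.1.isEmpty then st.2 else st.2 ++ [st.1])
def pvFlush (st : List Char × List (List Char)) : List (List Char) :=
  if st.1.isEmpty then st.2 else st.2 ++ [st.1]

theorem pv_alnum_not_space (c : Char) (h : PySem.Chars.isalnum c = true) :
    PySem.Chars.isspace c = false := by
  simp [PySem.Chars.isalnum, PySem.Chars.isalpha, PySem.Chars.isupper, PySem.Chars.islower,
    PySem.Chars.isdigit, PySem.Chars.isspace, Char.le_def, UInt32.le_iff_toNat_le] at *
  omega

theorem pv_keep_eq (c : Char) : pvKeep c = (pvTok c || c == ' ') := by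
  unfold pvKeep pvTok
  have hs : " _-".toList = [' ', '_', '-'] := rfl
  have hs2 : "_-".toList = ['_', '-'] := rfl
  rw [hs, hs2]
  simp only [List.contains_cons, List.contains_nil]
  cases hA : PySem.Chars.isalnum c <;> cases hb : (c == ' ') <;>
    cases hc : (c == '_') <;> cases hd : (c == '-') <;> rfl

theorem pv_tok_not_space (c : Char) (h : pvTok c = true) : PySem.Chars.isspace c = false := by
  unfold pvTok at h
  rcases Bool.or_eq_true_iff.mp h with h | h
  · exact pv_alnum_not_space c h
  · have hs2 : "_-".toList = ['_', '-'] := rfl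
    rw [hs2] at h
    simp only [List.contains_cons, List.contains_nil, Bool.or_eq_true, beq_iff_eq] at h
    rcases h with h | h | h
    · subst h; decide
    · subst h; decide
    · exact absurd h (by simp)

theorem pv_tok_clean (c : Char) (h : pvTok c = true) : pvClean c = c := by
  unfold pvClean
  rw [pv_keep_eq, h, Bool.true_or]
  rfl

theorem pv_untok_clean (c : Char) (h : pvTok c = false) : pvClean c = ' ' := by
  unfold pvClean
  rw [pv_keep_eq, h, Bool.false_or]
  cases hb : (c == ' ')
  · rfl
  · simp only [if_true]
    exact (beq_iff_eq.mp hb)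

theorem pv_space_clean (c : Char) : PySem.Chars.isspace (pvClean c) = !pvTok c := by
  cases h : pvTok c
  · rw [pv_untok_clean c h]; decide
  · rw [pv_tok_clean c h, pv_tok_not_space c h]; rfl

-- A's string-building loop is a map.
theorem pv_foldl_clean (cs : List Char) (acc : List Char) :
    cs.foldl (fun acc ch =>
      if PySem.Chars.isalnum ch || (" _-".toList).contains ch then acc ++ [ch] else acc ++ [' '])
      acc = acc ++ cs.map pvClean := by
  induction cs generalizing acc with
  | nil => simp
  | cons c cs ih =>
    simp only [List.foldl_cons, List.map_cons]
    cases h : (PySem.Chars.isalnum c || (" _-".toList).contains c) with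
    | true =>
      have hc : pvClean c = c := by unfold pvClean pvKeep; rw [h]; rfl
      simp only [if_true, ih, hc]
      simp
    | false =>
      have hc : pvClean c = ' ' := by unfold pvClean pvKeep; rw [h]; rfl
      simp only [Bool.false_eq_true, if_false, ih, hc]
      simp

-- The core correspondence: split₀ on the cleaned characters equals B's one-pass run collector.
theorem pv_go_eq (cs : List Char) (buf : List Char) (toks : List (List Char)) :
    PySem.Chars.split₀.go (cs.map pvClean) buf.reverse toks.reverse =
      pvFlush (cs.foldl pvStep (buf, toks)) := by
  induction cs generalizing buf toks with
  | nil =>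
    simp only [List.map_nil, PySem.Chars.split₀.go, List.foldl_nil, pvFlush]
    by_cases h : buf.isEmpty
    · simp [List.isEmpty_iff.mp h]
    · have : buf.reverse.isEmpty = false := by
        simp only [List.isEmpty_reverse]; simpa using h
      simp [this, h]
  | cons c cs ih =>
    simp only [List.map_cons, List.foldl_cons]
    rw [PySem.Chars.split₀.go, pv_space_clean]
    cases h : pvTok c
    · simp only [h, Bool.not_false, if_true, pvStep, Bool.false_eq_true, if_false]
      by_cases hb : buf.isEmpty
      · have hb' : buf.reverse.isEmpty = true := by simpa [List.isEmpty_reverse] using hb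
        rw [if_pos hb', if_pos hb]
        simpa using ih [] toks
      · have hb' : ¬ buf.reverse.isEmpty = true := by simpa [List.isEmpty_reverse] using hb
        rw [if_neg hb', if_neg hb]
        have h2 : buf.reverse.reverse :: toks.reverse = (toks ++ [buf]).reverse := by simp
        rw [h2]
        simpa using ih [] (toks ++ [buf])
    · simp only [h, Bool.not_true, Bool.false_eq_true, if_false, pvStep, if_true]
      rw [pv_tok_clean c h]
      have h2 : c :: buf.reverse = (buf ++ [c]).reverse := by simp
      rw [h2, ih]

-- Every token B collects consists of non-space characters.
theorem pv_pure (cs : List Char) (buf : List Char) (toks : List (List Char))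
    (hb : ∀ c ∈ buf, PySem.Chars.isspace c = false)
    (ht : ∀ t ∈ toks, ∀ c ∈ t, PySem.Chars.isspace c = false) :
    ∀ t ∈ pvFlush (cs.foldl pvStep (buf, toks)), ∀ c ∈ t, PySem.Chars.isspace c = false := by
  induction cs generalizing buf toks with
  | nil =>
    simp only [List.foldl_nil, pvFlush]
    by_cases h : buf.isEmpty
    · simpa [h] using ht
    · simp only [h]
      intro t htm
      rcases List.mem_append.mp htm with hm | hm
      · exact ht t hm
      · simp at hm; subst hm; exact hb
  | cons a cs ih =>
    simp only [List.foldl_cons, pvStep]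
    by_cases h : pvTok a = true
    · rw [if_pos h]
      refine ih (buf ++ [a]) toks ?_ ht
      intro x hx
      rcases List.mem_append.mp hx with hx | hx
      · exact hb x hx
      · simp at hx; subst hx; exact pv_tok_not_space _ h
    · rw [if_neg h]
      refine ih ([] : List Char) _ (by simp) ?_
      by_cases hbuf : buf.isEmpty
      · simpa [hbuf] using ht
      · simp only [hbuf]
        intro t htm
        rcases List.mem_append.mp htm with hm | hm
        · exact ht t hm
        · simp at hm; subst hm; exact hb

theorem pv_dropWhile_id (p : Char → Bool) (l : List Char) (h : ∀ c ∈ l, p c = false) :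
    l.dropWhile p = l := by
  cases l with
  | nil => rfl
  | cons c l => simp [h c (by simp)]

theorem pv_strip_id (t : List Char) (h : ∀ c ∈ t, PySem.Chars.isspace c = false) :
    PySem.Chars.strip t = t := by
  unfold PySem.Chars.strip PySem.Chars.lstrip PySem.Chars.rstrip
  rw [pv_dropWhile_id _ _ h, pv_dropWhile_id, List.reverse_reverse]
  intro c hc
  exact h c (List.mem_reverse.mp hc)

-- ===== VERDICT (by name: the statement is the Claim_ definition above) =====
theorem fts_sanitize_py_spec : Claim_equal_fts_sanitize_py := by
  intro query _
  unfold Spec_fts_sanitize_py fts_sanitize_py fts_sanitize_py_alt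
  simp only []
  rw [pv_foldl_clean, List.nil_append]
  have hgo := pv_go_eq query.toList [] []
  simp only [List.reverse_nil] at hgo
  rw [show PySem.Chars.split₀ (query.toList.map pvClean) =
        PySem.Chars.split₀.go (query.toList.map pvClean) [] [] from rfl]
  rw [hgo]
  have hpure := pv_pure query.toList [] [] (by simp) (by simp)
  set toks := pvFlush (query.toList.foldl pvStep ([], [])) with htoks
  have hstep : query.toList.foldl
      (fun (st : List Char × List (List Char)) ch =>
        if PySem.Chars.isalnum ch || ("_-".toList).contains ch then (st.1 ++ [ch], st.2)
        else (([] : List Char), if st.1.isEmpty then st.2 else st.2 ++ [st.1]))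
      ([], []) = query.toList.foldl pvStep ([], []) := rfl
  rw [hstep]
  have hfm : ((toks.filter (fun t => 2 ≤ (PySem.Chars.strip t).length)).map
      (fun t => PySem.Chars.strip t)) = toks.filter (fun t => 2 ≤ t.length) := by
    have hfilter : toks.filter (fun t => 2 ≤ (PySem.Chars.strip t).length)
        = toks.filter (fun t => 2 ≤ t.length) := by
      apply List.filter_congr
      intro t htm
      rw [pv_strip_id t (hpure t htm)]
    rw [hfilter]
    have : ∀ t ∈ toks.filter (fun t => 2 ≤ t.length), PySem.Chars.strip t = t := by
      intro t htm
      exact pv_strip_id t (hpure t (List.mem_of_mem_filter htm))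
    calc (toks.filter (fun t => 2 ≤ t.length)).map (fun t => PySem.Chars.strip t)
        = (toks.filter (fun t => 2 ≤ t.length)).map id := List.map_congr_left this
      _ = _ := by simp
  rw [hfm]
  rfl
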